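-- pv_equiv track=rewrite | github.com/kingkaushalagarwal/100daysofcoding | heap/magician_ans_chocolates.py | nchoc
-- ===== SOURCE A (Python) =====
-- from math import floor, ceil
-- import heapq
--
-- def nchoc(A, B):
--     pq = []
--     for i in range(len(B)):
--         pq.append(-B[i])
--     heapq.heapify(pq)
--
--     chocolates = 0
--     while A > 0:
--         c = heapq.heappop(pq)
--         chocolates += -c
--         heapq.heappush(pq, ceil(c / 2))
--         A -= 1
--     return chocolates % (10 ** 9 + 7)
-- ===== SOURCE B (Python) =====
-- def nchoc(A, B):
--     # simpler: no heapq, no negation trick -- scan for the max each round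
--     piles = list(B)
--     total = 0
--     for _ in range(A):
--         m = max(piles)
--         piles[piles.index(m)] = m // 2
--         total += m
--     return total % (10 ** 9 + 7)
-- ===== Notes on version B (the rewrite author's own statement) =====
-- stated objective: simpler
-- what changed: Replaces the negated min-heap (heapq with ceil(c/2) on negatives) by a plain list: each round take max(piles), replace its first occurrence with m // 2, accumulate; no negation, no heap, no float division.
import Mathlib
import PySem

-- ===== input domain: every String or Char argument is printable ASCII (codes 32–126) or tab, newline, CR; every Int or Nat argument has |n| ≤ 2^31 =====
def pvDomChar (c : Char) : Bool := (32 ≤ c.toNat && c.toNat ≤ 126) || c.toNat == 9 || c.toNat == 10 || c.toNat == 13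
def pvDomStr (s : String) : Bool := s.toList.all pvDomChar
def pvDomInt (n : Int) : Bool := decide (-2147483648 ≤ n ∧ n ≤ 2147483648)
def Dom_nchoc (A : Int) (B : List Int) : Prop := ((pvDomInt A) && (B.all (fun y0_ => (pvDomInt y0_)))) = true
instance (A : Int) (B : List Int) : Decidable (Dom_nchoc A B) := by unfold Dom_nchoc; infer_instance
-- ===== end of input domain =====

-- B replaces A's negated min-heap by a plain max-scan over the list (simpler, no heapq/negation/float);
-- the equivalence below is about the return value (A mutates only its local heap, B only its local copy).

-- ===== PORT A =====
-- ceil(c / 2) of Python: float division then ceil; exact as -((-c) // 2) for |c| ≤ 2^31 (Dom), far below 2^53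
def pyCeilHalf (c : Int) : Int := -(PySem.Int.floordiv (-c) 2)

-- the while-loop: heappop = first minimum removed (heapq value semantics), heappush = insert
def nchocLoopA : Nat → List Int → Int → Int
  | 0, _, choc => choc
  | n + 1, pq, choc =>
    match PySem.List.min? pq (fun x => x) with
    | none => choc   -- Python: heappop raises IndexError here (excluded by Pre_)
    | some c =>
      let pq' := (PySem.List.remove? pq c).getD []
      nchocLoopA n (pq' ++ [pyCeilHalf c]) (choc + (-c))

def nchoc (A : Int) (B : List Int) : Int :=
  let pq := B.foldl (fun acc x => acc ++ [-x]) []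
  PySem.Int.mod (nchocLoopA A.toNat pq 0) (10 ^ 9 + 7)

-- ===== PORT B =====
def nchocLoopB : Nat → List Int → Int → Int
  | 0, _, total => total
  | n + 1, piles, total =>
    match PySem.List.max? piles (fun x => x) with
    | none => total   -- Python: max([]) raises ValueError here (excluded by Pre_)
    | some m =>
      let i := (PySem.List.index? piles m).getD 0
      nchocLoopB n (piles.set i (PySem.Int.floordiv m 2)) (total + m)

def nchoc_alt (A : Int) (B : List Int) : Int :=
  PySem.Int.mod (nchocLoopB A.toNat B 0) (10 ^ 9 + 7)

-- ===== PRECONDITION & SPEC =====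
-- Pre_ excludes exactly the inputs where A raises: A > 0 with an empty B (heappop on an empty heap)
def Pre_nchoc (A : Int) (B : List Int) : Prop := A ≤ 0 ∨ B ≠ []
instance (A : Int) (B : List Int) : Decidable (Pre_nchoc A B) := by unfold Pre_nchoc; infer_instance
def pvWitness_nchoc : Int × List Int := (3, [5, 1])

def Spec_nchoc (A : Int) (B : List Int) (out : Int) : Prop := out = nchoc_alt A B
instance (A : Int) (B : List Int) (out : Int) : Decidable (Spec_nchoc A B out) := by unfold Spec_nchoc; infer_instance

-- ===== CLAIM (what is proved, stated in full; the proofs are below) =====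
def Claim_equal_nchoc : Prop := ∀ (A : Int) (B : List Int), Dom_nchoc A B → Pre_nchoc A B → Spec_nchoc A B (nchoc A B)

-- ===== LEMMAS AND PROOFS =====

-- replacing the first occurrence of a member m by v is, as a multiset, putting v in front of erasing m
lemma set_index_perm (piles : List Int) (m v : Int) (i : Nat)
    (hi : PySem.List.index? piles m = some i) :
    (piles.set i v).Perm (v :: piles.erase m) := by
  rw [PySem.List.index?_eq_some_iff] at hi
  obtain ⟨pre, suf, rfl, rfl, hnm⟩ := hi
  rw [List.erase_append_right _ hnm]
  have herase : (m :: suf).erase m = suf := by simp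
  rw [herase]
  have hset : (pre ++ m :: suf).set pre.length v = pre ++ v :: suf := by
    rw [List.set_append_right _ _ (le_refl _)]
    simp
  rw [hset]
  exact List.perm_middle

-- the loop invariant: A's heap is a permutation of the negation of B's list
lemma loop_eq (n : Nat) (pq piles : List Int) (choc : Int)
    (hperm : pq.Perm (piles.map (fun x => -x))) (hne : piles ≠ []) :
    nchocLoopA n pq choc = nchocLoopB n piles choc := by
  induction n generalizing pq piles choc with
  | zero => rfl
  | succ n ih =>
    -- B's side: the maximum exists
    obtain ⟨m, hm⟩ : ∃ m, PySem.List.max? piles (fun x => x) = some m := by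
      cases h : PySem.List.max? piles (fun x => x) with
      | none => exact absurd ((PySem.List.max?_eq_none_iff _ _).mp h) hne
      | some m => exact ⟨m, rfl⟩
    have hmmem : m ∈ piles := PySem.List.max?_mem hm
    have hmax : ∀ y ∈ piles, y ≤ m := PySem.List.max?_isMax hm
    -- A's side: the minimum exists and equals -m
    have hpqne : pq ≠ [] := by
      intro h; subst h
      exact hne (List.map_eq_nil_iff.mp (List.Perm.nil_eq hperm).symm)
    obtain ⟨c, hc⟩ : ∃ c, PySem.List.min? pq (fun x => x) = some c := by
      cases h : PySem.List.min? pq (fun x => x) with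
      | none => exact absurd ((PySem.List.min?_eq_none_iff _ _).mp h) hpqne
      | some c => exact ⟨c, rfl⟩
    have hcmem : c ∈ pq := PySem.List.min?_mem hc
    have hmin : ∀ y ∈ pq, c ≤ y := PySem.List.min?_isMin hc
    have hcm : c = -m := by
      have h1 : c ≤ -m := hmin _ (hperm.mem_iff.mpr (List.mem_map.mpr ⟨m, hmmem, rfl⟩))
      have h2 : -m ≤ c := by
        obtain ⟨p, hp, rfl⟩ := List.mem_map.mp (hperm.mem_iff.mp hcmem)
        exact neg_le_neg (hmax p hp)
      omega
    -- the index B rewrites at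
    obtain ⟨i, hi⟩ : ∃ i, PySem.List.index? piles m = some i :=
      Option.isSome_iff_exists.mp ((PySem.List.index?_isSome_iff _ _).mpr hmmem)
    -- unfold one round of each loop
    simp only [nchocLoopA, nchocLoopB, hc, hm, hi, Option.getD_some,
      PySem.List.remove?_eq_some_erase pq _ hcmem]
    subst hcm
    have hstep : (pq.erase (-m) ++ [pyCeilHalf (-m)]).Perm
        ((piles.set i (PySem.Int.floordiv m 2)).map (fun x => -x)) := by
      have h1 : pyCeilHalf (-m) = -(PySem.Int.floordiv m 2) := by
        simp [pyCeilHalf]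
      have h2 : ((piles.set i (PySem.Int.floordiv m 2)).map (fun x => -x)).Perm
          (-(PySem.Int.floordiv m 2) :: (piles.map (fun x => -x)).erase (-m)) := by
        have := (set_index_perm piles m (PySem.Int.floordiv m 2) i hi).map (fun x => -x)
        simp only [List.map_cons] at this
        rw [List.map_erase (f := fun x : Int => -x) (fun a b h => by dsimp at h; omega) piles] at this
        exact this
      refine (List.perm_append_singleton _ _).trans ?_
      rw [h1]
      exact (List.Perm.cons _ (hperm.erase _)).trans h2.symm
    have hne' : piles.set i (PySem.Int.floordiv m 2) ≠ [] := by
      intro h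
      have := congrArg List.length h
      simp at this
      exact hne this
    have hacc : choc + -(-m) = choc + m := by ring
    rw [hacc]
    exact ih _ _ _ hstep hne'

-- ===== VERDICT (by name: the statement is the Claim_ definition above) =====
theorem nchoc_spec : Claim_equal_nchoc := by
  intro A B _ hpre
  unfold Spec_nchoc nchoc nchoc_alt
  simp only [PySem.List.foldl_append_singleton_eq_map, List.nil_append]
  congr 1
  rcases hpre with hA | hB
  · have h0 : A.toNat = 0 := Int.toNat_of_nonpos hA
    simp [h0, nchocLoopA, nchocLoopB]
  · exact loop_eq A.toNat _ B 0 (List.Perm.refl _) hB
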